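-- pv_equiv track=rewrite | github.com/itachi1010/hackerrank-competition-code- | main2.7.py | solve
-- ===== SOURCE A (Python) =====
-- MOD = 10**9 + 7
--
-- def solve(n):
--     dp = [[0]*501 for _ in range(501)]
--     dp[0][0] = 1
--     for i in range(1, n+1):
--         dp[i][0] = 1
--         for j in range(1, i+1):
--             if i%2 == j%2:
--                 dp[i][j] = (dp[i-1][j-1] + dp[i-1][j]) % MOD
--             else:
--                 dp[i][j] = dp[i-1][j]
--     return sum(dp[n]) % MOD
-- ===== SOURCE B (Python) =====
-- MOD = 10**9 + 7
--
-- def solve(n):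
--     # the row sums of the parity DP are Fibonacci numbers: fast-doubling Fibonacci mod MOD
--     def fib(k):  # returns (F(k), F(k+1)) mod MOD
--         if k == 0:
--             return (0, 1)
--         a, b = fib(k >> 1)
--         c = a * ((2 * b - a) % MOD) % MOD
--         d = (a * a + b * b) % MOD
--         if k & 1:
--             return (d, (c + d) % MOD)
--         return (c, d)
--     return fib(n + 2)[0]
-- ===== Notes on version B (the rewrite author's own statement) =====
-- stated objective: alternative
-- what changed: B replaces the 501x501 parity-DP table (whose row sums follow the Fibonacci recurrence) by a fast-doubling Fibonacci computation mod 10^9+7, returning F(n+2) mod 10^9+7 directly; intended as faster (O(log n) vs O(n^2), n capped at 500 by A): one timing run measured B ~50x faster at n=256, another could not confirm under its consistency rule, so no speed is claimed.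
-- intended difference: For n = -1 A returns 0, read by negative-index wraparound from an untouched row of its preallocated table, while B returns 1 = F(1) mod 10^9+7, the value consistent with the Fibonacci sequence the function computes. — e.g. on solve(-1): A returns 0, B returns 1
-- outside the precondition, e.g. on solve(-3): A returns 0, B raises RecursionError; on solve(-501): A returns 1, B raises RecursionError
import Mathlib
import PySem

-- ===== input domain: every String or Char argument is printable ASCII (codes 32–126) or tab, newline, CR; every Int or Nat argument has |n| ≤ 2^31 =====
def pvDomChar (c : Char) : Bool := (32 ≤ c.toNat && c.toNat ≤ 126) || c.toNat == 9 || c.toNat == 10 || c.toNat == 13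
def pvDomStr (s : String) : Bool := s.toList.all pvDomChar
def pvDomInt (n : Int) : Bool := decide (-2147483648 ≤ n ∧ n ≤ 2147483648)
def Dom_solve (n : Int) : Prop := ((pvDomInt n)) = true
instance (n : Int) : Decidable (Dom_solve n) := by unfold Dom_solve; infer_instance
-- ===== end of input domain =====

-- B replaces A's 501x501 parity-DP table by a fast-doubling Fibonacci computation mod 10^9+7 (alternative algorithm).

set_option maxRecDepth 1000000
set_option maxHeartbeats 2000000


def pvMOD : Int := 1000000007

-- ===== PORT A =====
-- dp[i][j] read: exact for 0 ≤ i, j < 501; inside the loops (with Pre_solve) all reads are in range.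
def pvGet (dp : List (List Int)) (i j : Int) : Int := (dp.getD i.toNat []).getD j.toNat 0
-- dp[i][j] = v: exact for 0 ≤ i, j < 501; inside the loops (with Pre_solve) all writes are in range.
def pvSet (dp : List (List Int)) (i j : Int) (v : Int) : List (List Int) :=
  dp.set i.toNat ((dp.getD i.toNat []).set j.toNat v)

def solve (n : Int) : Int :=
  let dp0 : List (List Int) := List.replicate 501 (List.replicate 501 0)
  let dp1 := pvSet dp0 0 0 1
  let dp2 := (PySem.List.pyRange 1 (n + 1) 1).foldl (fun dp i =>
      (PySem.List.pyRange 1 (i + 1) 1).foldl (fun dp j =>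
        if PySem.Int.mod i 2 == PySem.Int.mod j 2 then
          pvSet dp i j (PySem.Int.mod (pvGet dp (i-1) (j-1) + pvGet dp (i-1) j) pvMOD)
        else
          pvSet dp i j (pvGet dp (i-1) j)) (pvSet dp i 0 1)) dp1
  -- sum(dp[n]) % MOD; dp[n] read via pyGetD: exact for -501 ≤ n ≤ 500 (guaranteed by Pre_solve)
  PySem.Int.mod ((PySem.List.pyGetD dp2 n []).foldl (· + ·) 0) pvMOD

-- ===== PORT B =====
-- fast-doubling fib(k) -> (F(k), F(k+1)) mod MOD.  Python's base case is k == 0 and its recursion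
-- never terminates for k < 0 (RecursionError, outside Pre_solve); the fuel k.toNat + 1 (enough for
-- the halving recursion) and the k ≤ 0 base only totalize the port, they change no returned value.
def pvFibGo : Nat → Int → Int × Int
  | 0, _ => (0, 1)
  | fuel+1, k =>
    if k ≤ 0 then (0, 1)
    else
      let p := pvFibGo fuel (k >>> (1 : Nat))
      let a := p.1
      let b := p.2
      let c := PySem.Int.mod (a * (PySem.Int.mod (2 * b - a) pvMOD)) pvMOD
      let d := PySem.Int.mod (a * a + b * b) pvMOD
      if PySem.Int.band k 1 ≠ 0 then (d, PySem.Int.mod (c + d) pvMOD) else (c, d)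

def pvFibFD (k : Int) : Int × Int := pvFibGo (k.toNat + 1) k

def solve_alt (n : Int) : Int := (pvFibFD (n + 2)).1

-- ===== PRECONDITION & SPEC =====
-- Pre_solve keeps exactly the inputs where both programs return a value: A raises IndexError for
-- n > 500 and n < -501 (its table is preallocated at 501×501); for -501 ≤ n ≤ -3 A returns a
-- negative-index wraparound artefact while B's recursion raises RecursionError.
def Pre_solve (n : Int) : Prop := -2 ≤ n ∧ n ≤ 500
instance (n : Int) : Decidable (Pre_solve n) := by unfold Pre_solve; infer_instance
def pvWitness_solve : Int := 7

-- For n = -1 A returns 0 (negative-index wraparound reads an untouched table row) while B returns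
-- 1 = F(1) mod 10^9+7, the value consistent with the Fibonacci sequence the function computes.
def D_solve (n : Int) : Prop := n = -1
instance (n : Int) : Decidable (D_solve n) := by unfold D_solve; infer_instance
def Spec_solve (n : Int) (out : Int) : Prop := ¬ D_solve n → out = solve_alt n
instance (n : Int) (out : Int) : Decidable (Spec_solve n out) := by unfold Spec_solve; infer_instance
def pvDiffWitness_solve : Int := -1
def pvDiffWitnessOut_solve : Int × Int := (0, 1)

-- ===== CLAIM (what is proved, stated in full; the proofs are below) =====
def Claim_unchanged_solve : Prop := ∀ (n : Int), Dom_solve n → Pre_solve n → Spec_solve n (solve n)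
def Claim_changed_solve : Prop := Dom_solve (pvDiffWitness_solve) ∧ Pre_solve (pvDiffWitness_solve) ∧ D_solve (pvDiffWitness_solve) ∧ solve (pvDiffWitness_solve) = pvDiffWitnessOut_solve.1 ∧ solve_alt (pvDiffWitness_solve) = pvDiffWitnessOut_solve.2 ∧ pvDiffWitnessOut_solve.1 ≠ pvDiffWitnessOut_solve.2
def Claim_exact_solve : Prop := ∀ (n : Int), Dom_solve n → Pre_solve n → D_solve n → solve n ≠ solve_alt n

-- ===== LEMMAS AND PROOFS =====

-- mathematical description of A's table: pvF i j is the final value of dp[i][j]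
def pvF : ℕ → ℕ → Int
  | 0, j => if j = 0 then 1 else 0
  | i+1, j =>
      if j = 0 then 1
      else if i+1 < j then 0
      else if (i+1) % 2 = j % 2 then PySem.Int.mod (pvF i (j-1) + pvF i j) pvMOD
      else pvF i j

def pvTab (r : ℕ → ℕ → Int) : List (List Int) :=
  (List.range 501).map (fun i => (List.range 501).map (r i))

-- table state after the outer loop has processed rows 1..m
def pvState (m : ℕ) : ℕ → ℕ → Int := fun i j => if i ≤ m then pvF i j else 0
-- table state while processing row m+1, after the inner loop has processed j = 1..t
def pvPst (m t : ℕ) : ℕ → ℕ → Int := fun i j =>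
  if i ≤ m then pvF i j
  else if i = m + 1 then (if j = 0 then 1 else if j ≤ t then pvF (m+1) j else 0)
  else 0

theorem pvTab_congr {r s : ℕ → ℕ → Int} (h : ∀ i < 501, ∀ j < 501, r i j = s i j) :
    pvTab r = pvTab s := by
  unfold pvTab
  apply List.map_congr_left
  intro i hi
  apply List.map_congr_left
  intro j hj
  exact h i (List.mem_range.mp hi) j (List.mem_range.mp hj)

theorem set_map_range {α : Type} (g : ℕ → α) (m j : ℕ) (v : α) (hj : j < m) :
    ((List.range m).map g).set j v = (List.range m).map (fun b => if b = j then v else g b) := by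
  apply List.ext_getElem (by simp)
  intro k h1 h2
  simp only [List.getElem_set, List.getElem_map, List.getElem_range]
  by_cases h : j = k
  · subst h
    simp
  · rw [if_neg h, if_neg (fun hc => h hc.symm)]

theorem pvGet_pvTab (r : ℕ → ℕ → Int) (i j : ℕ) (hi : i < 501) (hj : j < 501) :
    pvGet (pvTab r) (i : ℤ) (j : ℤ) = r i j := by
  unfold pvGet pvTab
  simp only [Int.toNat_natCast]
  rw [PySem.List.getD_map_range _ _ _ _ hi, PySem.List.getD_map_range _ _ _ _ hj]

theorem pvSet_pvTab (r : ℕ → ℕ → Int) (i j : ℕ) (hi : i < 501) (hj : j < 501) (v : Int) :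
    pvSet (pvTab r) (i : ℤ) (j : ℤ) v
      = pvTab (fun a b => if a = i ∧ b = j then v else r a b) := by
  unfold pvSet pvTab
  simp only [Int.toNat_natCast]
  rw [PySem.List.getD_map_range _ _ _ _ hi]
  rw [set_map_range _ _ _ _ hj]
  rw [set_map_range _ _ _ _ hi]
  apply List.map_congr_left
  intro a _
  by_cases h : a = i
  · subst h
    rw [if_pos rfl]
    apply List.map_congr_left
    intro b _
    by_cases h2 : b = j <;> simp [h2]
  · rw [if_neg h]
    apply List.map_congr_left
    intro b _
    simp [h]

theorem pvF_zero_right (m : ℕ) : pvF m 0 = 1 := by cases m <;> simp [pvF]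

theorem pvF_zero_of_lt : ∀ i j, i < j → pvF i j = 0 := by
  intro i
  induction i with
  | zero => intro j hj; simp [pvF]; omega
  | succ k _ =>
      intro j hj
      conv_lhs => rw [pvF]
      rw [if_neg (by omega), if_pos (by omega)]

theorem pvF_succ_match (m j : ℕ) (h0 : ¬ j = 0) (h1 : ¬ m + 1 < j) (h2 : (m+1) % 2 = j % 2) :
    pvF (m+1) j = PySem.Int.mod (pvF m (j-1) + pvF m j) pvMOD := by
  conv_lhs => rw [pvF]
  rw [if_neg h0, if_neg h1, if_pos h2]

theorem pvF_succ_nomatch (m j : ℕ) (h0 : ¬ j = 0) (h1 : ¬ m + 1 < j) (h2 : ¬ (m+1) % 2 = j % 2) :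
    pvF (m+1) j = pvF m j := by
  conv_lhs => rw [pvF]
  rw [if_neg h0, if_neg h1, if_neg h2]

-- the initial table (dp[0][0] = 1) is pvTab (pvState 0)
theorem pvInit_eq :
    pvSet (List.replicate 501 (List.replicate 501 (0:Int))) 0 0 1 = pvTab (pvState 0) := by
  have h : List.replicate 501 (List.replicate 501 (0:Int)) = pvTab (fun _ _ => 0) := by
    unfold pvTab
    apply List.ext_getElem
      (by simp only [List.length_replicate, List.length_map, List.length_range])
    intro k h1 h2
    simp only [List.getElem_replicate, List.getElem_map]
    rw [List.map_const', List.length_range]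
  rw [h]
  have h2 := pvSet_pvTab (fun _ _ => 0) 0 0 (by norm_num) (by norm_num) 1
  simp only [Nat.cast_zero] at h2
  rw [h2]
  apply pvTab_congr
  intro i _ j _
  unfold pvState
  by_cases h3 : i = 0
  · subst h3
    rw [if_pos (Nat.le_refl 0)]
    by_cases h4 : j = 0
    · subst h4
      decide
    · rw [if_neg (fun hc => h4 hc.2),
          show pvF 0 j = 0 from by conv_lhs => rw [pvF]; rw [if_neg h4]]
  · rw [if_neg (fun hc => h3 hc.1), if_neg (by omega)]

-- ZMod side
theorem cast_pymod (a : Int) :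
    ((PySem.Int.mod a pvMOD : Int) : ZMod 1000000007) = (a : ZMod 1000000007) := by
  rw [PySem.Int.mod_eq_emod_of_pos (by norm_num [pvMOD])]
  have h : (pvMOD : ℤ) = ((1000000007 : ℕ) : ℤ) := by norm_num [pvMOD]
  rw [h]
  exact ZMod.intCast_mod a 1000000007

def pvFz (i j : ℕ) : ZMod 1000000007 := ((pvF i j : Int) : ZMod 1000000007)

theorem pvFz_step (m j : ℕ) :
    pvFz (m+1) j = pvFz m j + (if j % 2 = (m+1) % 2 ∧ 1 ≤ j then pvFz m (j-1) else 0) := by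
  unfold pvFz
  by_cases h0 : j = 0
  · subst h0
    simp [pvF_zero_right]
  · by_cases h1 : m + 1 < j
    · rw [show pvF (m+1) j = 0 from by conv_lhs => rw [pvF]; rw [if_neg h0, if_pos h1]]
      rw [pvF_zero_of_lt m j (by omega)]
      split_ifs with h2
      · rw [pvF_zero_of_lt m (j-1) (by omega)]; simp
      · simp
    · by_cases h2 : (m+1) % 2 = j % 2
      · rw [pvF_succ_match m j h0 h1 h2, cast_pymod, if_pos ⟨h2.symm, by omega⟩]
        push_cast
        ring
      · rw [pvF_succ_nomatch m j h0 h1 h2, if_neg (fun hc => h2 hc.1.symm)]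
        simp

def pvT (m : ℕ) : ZMod 1000000007 := ∑ j ∈ Finset.range 501, pvFz m j
def pvV (m : ℕ) : ZMod 1000000007 :=
  ∑ j ∈ Finset.range 501, (if j % 2 = m % 2 then pvFz m j else 0)

theorem pvFz_500 (m : ℕ) (hm : m ≤ 499) : pvFz m 500 = 0 := by
  unfold pvFz
  rw [pvF_zero_of_lt m 500 (by omega)]
  simp

theorem pvW_eq (m : ℕ) (hm : m ≤ 499) :
    (∑ j ∈ Finset.range 501, (if j % 2 = (m+1) % 2 ∧ 1 ≤ j then pvFz m (j-1) else 0)) = pvV m := by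
  have e1 := Finset.sum_range_succ' (fun j => if j % 2 = (m+1) % 2 ∧ 1 ≤ j then pvFz m (j-1) else 0) 500
  norm_num at e1
  have e2 := Finset.sum_range_succ (fun j => if j % 2 = m % 2 then pvFz m j else 0) 500
  norm_num at e2
  unfold pvV
  rw [e1, e2, pvFz_500 m hm]
  simp only [ite_self, add_zero]
  apply Finset.sum_congr rfl
  intro k _
  by_cases h : k % 2 = m % 2
  · rw [if_pos (by omega), if_pos h]
  · rw [if_neg (by omega), if_neg h]

theorem pvT_succ (m : ℕ) (hm : m ≤ 499) : pvT (m+1) = pvT m + pvV m := by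
  unfold pvT
  calc ∑ j ∈ Finset.range 501, pvFz (m+1) j
      = ∑ j ∈ Finset.range 501,
          (pvFz m j + (if j % 2 = (m+1) % 2 ∧ 1 ≤ j then pvFz m (j-1) else 0)) := by
        apply Finset.sum_congr rfl; intro j _; exact pvFz_step m j
    _ = (∑ j ∈ Finset.range 501, pvFz m j)
        + ∑ j ∈ Finset.range 501, (if j % 2 = (m+1) % 2 ∧ 1 ≤ j then pvFz m (j-1) else 0) := by
        rw [Finset.sum_add_distrib]
    _ = (∑ j ∈ Finset.range 501, pvFz m j) + pvV m := by rw [pvW_eq m hm]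

theorem pvV_succ (m : ℕ) (hm : m ≤ 499) : pvV (m+1) = pvT m := by
  unfold pvV
  have hsplit : ∀ j : ℕ,
      (if j % 2 = (m+1) % 2 then pvFz (m+1) j else 0)
        = (if j % 2 = (m+1) % 2 then pvFz m j else 0)
          + (if j % 2 = (m+1) % 2 ∧ 1 ≤ j then pvFz m (j-1) else 0) := by
    intro j
    rw [pvFz_step m j]
    by_cases h : j % 2 = (m+1) % 2 <;> by_cases h1 : 1 ≤ j <;> simp [h, h1]
  calc ∑ j ∈ Finset.range 501, (if j % 2 = (m+1) % 2 then pvFz (m+1) j else 0)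
      = (∑ j ∈ Finset.range 501, (if j % 2 = (m+1) % 2 then pvFz m j else 0))
        + ∑ j ∈ Finset.range 501, (if j % 2 = (m+1) % 2 ∧ 1 ≤ j then pvFz m (j-1) else 0) := by
        rw [← Finset.sum_add_distrib]
        exact Finset.sum_congr rfl (fun j _ => hsplit j)
    _ = (∑ j ∈ Finset.range 501, (if j % 2 = (m+1) % 2 then pvFz m j else 0)) + pvV m := by
        rw [pvW_eq m hm]
    _ = pvT m := by
        unfold pvT pvV
        rw [← Finset.sum_add_distrib]
        apply Finset.sum_congr rfl
        intro j _
        by_cases h : j % 2 = m % 2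
        · rw [if_pos h, if_neg (by omega)]
          simp
        · rw [if_neg h, if_pos (by omega)]
          simp

theorem pvT_zero : pvT 0 = 1 := by
  unfold pvT pvFz
  calc ∑ j ∈ Finset.range 501, ((pvF 0 j : ℤ) : ZMod 1000000007)
      = ∑ j ∈ Finset.range 501, (if j = 0 then (1 : ZMod 1000000007) else 0) := by
        apply Finset.sum_congr rfl
        intro j _
        by_cases h : j = 0 <;> simp [pvF, h]
    _ = 1 := by rw [Finset.sum_ite_eq' (Finset.range 501) 0 (fun _ => (1:ZMod 1000000007))]; simp

theorem pvV_zero : pvV 0 = 1 := by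
  unfold pvV pvFz
  calc ∑ j ∈ Finset.range 501, (if j % 2 = 0 % 2 then ((pvF 0 j : ℤ) : ZMod 1000000007) else 0)
      = ∑ j ∈ Finset.range 501, (if j = 0 then (1 : ZMod 1000000007) else 0) := by
        apply Finset.sum_congr rfl
        intro j _
        by_cases h : j = 0
        · subst h; simp [pvF]
        · by_cases h2 : j % 2 = 0 <;> simp [pvF, h, h2]
    _ = 1 := by rw [Finset.sum_ite_eq' (Finset.range 501) 0 (fun _ => (1:ZMod 1000000007))]; simp

theorem pvTV_fib (m : ℕ) (hm : m ≤ 500) :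
    pvV m = (Nat.fib (m+1) : ZMod 1000000007) ∧ pvT m = (Nat.fib (m+2) : ZMod 1000000007) := by
  induction m with
  | zero => exact ⟨by rw [pvV_zero]; simp, by rw [pvT_zero]; simp⟩
  | succ k ih =>
      obtain ⟨hV, hT⟩ := ih (by omega)
      refine ⟨by rw [pvV_succ k (by omega), hT], ?_⟩
      rw [pvT_succ k (by omega), hT, hV, show k+1+2 = k+1+2 from rfl]
      rw [show Nat.fib (k+1+2) = Nat.fib (k+1) + Nat.fib (k+1+1) from Nat.fib_add_two]
      push_cast
      ring

-- the inner loop body takes the partial row t to the partial row t+1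
theorem pvInner_step (m t : ℕ) (ht : t + 1 ≤ m + 1) (hm : m + 1 ≤ 500) :
    (if PySem.Int.mod ((m:ℤ)+1) 2 == PySem.Int.mod ((t:ℤ)+1) 2 then
        pvSet (pvTab (pvPst m t)) ((m:ℤ)+1) ((t:ℤ)+1)
          (PySem.Int.mod (pvGet (pvTab (pvPst m t)) ((m:ℤ)+1-1) ((t:ℤ)+1-1)
            + pvGet (pvTab (pvPst m t)) ((m:ℤ)+1-1) ((t:ℤ)+1)) pvMOD)
      else
        pvSet (pvTab (pvPst m t)) ((m:ℤ)+1) ((t:ℤ)+1)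
          (pvGet (pvTab (pvPst m t)) ((m:ℤ)+1-1) ((t:ℤ)+1)))
      = pvTab (pvPst m (t+1)) := by
  have hcm : ((m:ℤ)+1) = ((m+1 : ℕ) : ℤ) := by push_cast; ring
  have hct : ((t:ℤ)+1) = ((t+1 : ℕ) : ℤ) := by push_cast; ring
  have hcm1 : ((m:ℤ)+1-1) = ((m : ℕ) : ℤ) := by ring
  have hct1 : ((t:ℤ)+1-1) = ((t : ℕ) : ℤ) := by ring
  have hmod : ∀ a : ℕ, PySem.Int.mod ((a:ℕ):ℤ) 2 = (((a % 2 : ℕ)):ℤ) := by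
    intro a
    rw [PySem.Int.mod_eq_emod_of_pos (by norm_num)]
    omega
  have hget1 : pvGet (pvTab (pvPst m t)) ((m:ℤ)+1-1) ((t:ℤ)+1-1) = pvF m t := by
    rw [hcm1, hct1, pvGet_pvTab _ m t (by omega) (by omega)]
    unfold pvPst
    rw [if_pos (le_refl m)]
  have hget2 : pvGet (pvTab (pvPst m t)) ((m:ℤ)+1-1) ((t:ℤ)+1) = pvF m (t+1) := by
    rw [hcm1, hct, pvGet_pvTab _ m (t+1) (by omega) (by omega)]
    unfold pvPst
    rw [if_pos (le_refl m)]
  have hupd : ∀ (v : Int), v = pvF (m+1) (t+1) →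
      pvTab (fun a b => if a = m+1 ∧ b = t+1 then v else pvPst m t a b) = pvTab (pvPst m (t+1)) := by
    intro v hv
    subst hv
    apply pvTab_congr
    intro i _ j _
    by_cases hij : i = m+1 ∧ j = t+1
    · obtain ⟨hi1, hj1⟩ := hij
      subst hi1; subst hj1
      rw [if_pos ⟨rfl, rfl⟩]
      unfold pvPst
      rw [if_neg (by omega), if_pos rfl, if_neg (by omega), if_pos (le_refl (t+1))]
    · rw [if_neg hij]
      unfold pvPst
      by_cases h1 : i ≤ m
      · rw [if_pos h1, if_pos h1]
      · by_cases h2 : i = m+1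
        · subst h2
          rw [if_neg h1, if_neg h1, if_pos rfl, if_pos rfl]
          by_cases h3 : j = 0
          · rw [if_pos h3, if_pos h3]
          · have hj : ¬ j = t+1 := fun hc => hij ⟨rfl, hc⟩
            rw [if_neg h3, if_neg h3]
            by_cases h4 : j ≤ t
            · rw [if_pos h4, if_pos (by omega)]
            · rw [if_neg h4, if_neg (by omega)]
        · rw [if_neg h1, if_neg h1, if_neg h2, if_neg h2]
  by_cases hpar : (m+1) % 2 = (t+1) % 2
  · rw [if_pos (by
      rw [hcm, hct, hmod, hmod, beq_iff_eq]
      exact_mod_cast hpar)]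
    rw [hget1, hget2, hcm, hct]
    rw [pvSet_pvTab _ (m+1) (t+1) (by omega) (by omega)]
    apply hupd
    exact (pvF_succ_match m (t+1) (by omega) (by omega) (by omega)).symm
  · rw [if_neg (by
      rw [hcm, hct, hmod, hmod, beq_iff_eq]
      intro hc
      exact hpar (by exact_mod_cast hc))]
    rw [hget2, hcm, hct]
    rw [pvSet_pvTab _ (m+1) (t+1) (by omega) (by omega)]
    apply hupd
    exact (pvF_succ_nomatch m (t+1) (by omega) (by omega) (by omega)).symm

theorem pvInner_fold (m : ℕ) (hm : m + 1 ≤ 500) (t : ℕ) (ht : t ≤ m + 1) :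
    (PySem.List.pyRange 1 ((t:ℤ)+1) 1).foldl
      (fun (dp : List (List Int)) (j : ℤ) =>
        if PySem.Int.mod ((m:ℤ)+1) 2 == PySem.Int.mod j 2 then
          pvSet dp ((m:ℤ)+1) j (PySem.Int.mod (pvGet dp ((m:ℤ)+1-1) (j-1) + pvGet dp ((m:ℤ)+1-1) j) pvMOD)
        else
          pvSet dp ((m:ℤ)+1) j (pvGet dp ((m:ℤ)+1-1) j))
      (pvTab (pvPst m 0)) = pvTab (pvPst m t) := by
  induction t with
  | zero =>
      rw [show ((0:ℕ):ℤ) + 1 = 1 from by norm_num, PySem.List.pyRange_one_eq_nil (le_refl 1)]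
      rfl
  | succ k ih =>
      rw [show ((k+1:ℕ):ℤ) + 1 = ((k:ℤ)+1) + 1 from by push_cast; ring,
          PySem.List.pyRange_one_succ_right (by omega),
          List.foldl_append]
      rw [ih (by omega)]
      simp only [List.foldl_cons, List.foldl_nil]
      exact pvInner_step m k (by omega) hm

theorem pvOuter_fold (m : ℕ) (hm : m ≤ 500) :
    (PySem.List.pyRange 1 ((m:ℤ)+1) 1).foldl
      (fun dp i =>
        (PySem.List.pyRange 1 (i + 1) 1).foldl (fun dp j =>
          if PySem.Int.mod i 2 == PySem.Int.mod j 2 then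
            pvSet dp i j (PySem.Int.mod (pvGet dp (i-1) (j-1) + pvGet dp (i-1) j) pvMOD)
          else
            pvSet dp i j (pvGet dp (i-1) j)) (pvSet dp i 0 1))
      (pvTab (pvState 0)) = pvTab (pvState m) := by
  induction m with
  | zero =>
      rw [show ((0:ℕ):ℤ) + 1 = 1 from by norm_num, PySem.List.pyRange_one_eq_nil (le_refl 1)]
      rfl
  | succ k ih =>
      rw [show ((k+1:ℕ):ℤ) + 1 = ((k:ℤ)+1) + 1 from by push_cast; ring,
          PySem.List.pyRange_one_succ_right (by omega),
          List.foldl_append]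
      rw [ih (by omega)]
      simp only [List.foldl_cons, List.foldl_nil]
      -- the dp[i][0] = 1 write produces pvPst k 0
      have hstart : pvSet (pvTab (pvState k)) ((k:ℤ)+1) 0 1 = pvTab (pvPst k 0) := by
        rw [show ((k:ℤ)+1) = ((k+1 : ℕ) : ℤ) from by push_cast; ring,
            show (0:ℤ) = ((0:ℕ):ℤ) from rfl,
            pvSet_pvTab _ (k+1) 0 (by omega) (by omega)]
        apply pvTab_congr
        intro i _ j _
        unfold pvState pvPst
        by_cases h1 : i = k+1 ∧ j = 0
        · obtain ⟨hi1, hj1⟩ := h1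
          subst hi1; subst hj1
          rw [if_pos ⟨rfl, rfl⟩, if_neg (by omega), if_pos rfl, if_pos rfl]
        · rw [if_neg h1]
          by_cases h2 : i ≤ k
          · rw [if_pos h2, if_pos h2]
          · by_cases h3 : i = k+1
            · subst h3
              have hj : ¬ j = 0 := fun hc => h1 ⟨rfl, hc⟩
              rw [if_neg h2, if_neg h2, if_pos rfl, if_neg hj, if_neg (by omega)]
            · rw [if_neg h2, if_neg h2, if_neg h3]
      rw [hstart]
      have hin := pvInner_fold k (by omega) (k+1) (le_refl (k+1))
      rw [show ((k+1:ℕ):ℤ) = (k:ℤ)+1 from by push_cast; ring] at hin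
      rw [hin]
      apply pvTab_congr
      intro i _ j _
      unfold pvPst pvState
      by_cases h1 : i ≤ k
      · rw [if_pos h1, if_pos (by omega)]
      · by_cases h2 : i = k+1
        · subst h2
          rw [if_neg h1, if_pos rfl, if_pos (le_refl (k+1))]
          by_cases h3 : j = 0
          · subst h3
            rw [if_pos rfl, (pvF_zero_right (k+1)).symm]
          · rw [if_neg h3]
            by_cases h4 : j ≤ k+1
            · rw [if_pos h4]
            · rw [if_neg h4, (pvF_zero_of_lt (k+1) j (by omega)).symm]
        · rw [if_neg h1, if_neg h2, if_neg (by omega)]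

-- sum over a row, cast into ZMod
theorem cast_sum_range (g : ℕ → ℤ) (n : ℕ) :
    ((((List.range n).map g).sum : ℤ) : ZMod 1000000007)
      = ∑ j ∈ Finset.range n, ((g j : ℤ) : ZMod 1000000007) := by
  induction n with
  | zero => simp
  | succ k ih =>
      rw [List.range_succ, List.map_append, List.sum_append, Finset.sum_range_succ]
      push_cast [ih]
      simp

theorem solve_eq_modsum (m : ℕ) (hm : m ≤ 500) :
    solve (m : ℤ) = PySem.Int.mod (((List.range 501).map (pvF m)).sum) pvMOD := by
  unfold solve
  simp only []
  rw [pvInit_eq, pvOuter_fold m hm]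
  have hrow : PySem.List.pyGetD (pvTab (pvState m)) (m : ℤ) [] = (List.range 501).map (pvF m) := by
    rw [PySem.List.pyGetD_of_nonneg _ _ (by positivity)]
    simp only [Int.toNat_natCast]
    unfold pvTab
    rw [PySem.List.getD_map_range _ _ _ _ (by omega)]
    apply List.map_congr_left
    intro j _
    unfold pvState
    rw [if_pos (le_refl m)]
  rw [hrow, ← List.sum_eq_foldl]

-- B side: fast doubling computes the Fibonacci pair mod MOD
theorem pvFibGo_cast : ∀ (fuel : ℕ) (j : ℕ), j < fuel →
    (((pvFibGo fuel (j:ℤ)).1 : ℤ) : ZMod 1000000007) = (Nat.fib j : ZMod 1000000007)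
      ∧ (((pvFibGo fuel (j:ℤ)).2 : ℤ) : ZMod 1000000007) = (Nat.fib (j+1) : ZMod 1000000007) := by
  intro fuel
  induction fuel with
  | zero => intro j hj; omega
  | succ f ih =>
      intro j hj
      by_cases h0 : j = 0
      · subst h0
        simp [pvFibGo]
      · rw [pvFibGo]
        rw [if_neg (by omega)]
        have hshift : ((j:ℤ) >>> (1:ℕ)) = ((j/2 : ℕ) : ℤ) := by
          rw [Int.shiftRight_eq_div_pow, show (((2:ℕ)^1 : ℕ):ℤ) = 2 from rfl]
          omega
        have hband : PySem.Int.band (j:ℤ) 1 = ((j % 2 : ℕ) : ℤ) := by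
          rw [PySem.Int.band_one, PySem.Int.mod_eq_emod_of_pos (by norm_num)]
          omega
        obtain ⟨ha, hb⟩ := ih (j/2) (by omega)
        rw [hshift]
        set q := j / 2 with hq
        have hfq : Nat.fib q ≤ 2 * Nat.fib (q+1) := by
          have := @Nat.fib_le_fib_succ q
          omega
        have hc : (((PySem.Int.mod ((pvFibGo f (q:ℤ)).1 *
              (PySem.Int.mod (2 * (pvFibGo f (q:ℤ)).2 - (pvFibGo f (q:ℤ)).1) pvMOD)) pvMOD : ℤ)) : ZMod 1000000007)
            = (Nat.fib (2*q) : ZMod 1000000007) := by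
          rw [cast_pymod]
          push_cast
          rw [cast_pymod]
          push_cast
          rw [ha, hb]
          rw [Nat.fib_two_mul]
          push_cast [Nat.cast_sub hfq]
          ring
        have hd : (((PySem.Int.mod ((pvFibGo f (q:ℤ)).1 * (pvFibGo f (q:ℤ)).1
              + (pvFibGo f (q:ℤ)).2 * (pvFibGo f (q:ℤ)).2) pvMOD : ℤ)) : ZMod 1000000007)
            = (Nat.fib (2*q+1) : ZMod 1000000007) := by
          rw [cast_pymod]
          push_cast
          rw [ha, hb]
          rw [Nat.fib_two_mul_add_one]
          push_cast
          ring
        by_cases hpar : j % 2 = 1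
        · rw [if_pos (by rw [hband, hpar]; norm_num)]
          have hjq : j = 2*q + 1 := by omega
          constructor
          · simp only []
            rw [hd, hjq]
          · simp only []
            rw [cast_pymod]
            push_cast
            rw [hc, hd]
            rw [hjq, show 2*q+1+1 = 2*q+2 from rfl,
                show Nat.fib (2*q+2) = Nat.fib (2*q) + Nat.fib (2*q+1) from Nat.fib_add_two]
            push_cast
            ring
        · rw [if_neg (by rw [hband, show j % 2 = 0 from by omega]; norm_num)]
          have hjq : j = 2*q := by omega
          constructor
          · simp only []
            rw [hc, hjq]
          · simp only []
            rw [hd, hjq]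

theorem pvFibFD_bound (k : ℤ) (hk : 0 < k) :
    0 ≤ (pvFibFD k).1 ∧ (pvFibFD k).1 < pvMOD := by
  unfold pvFibFD
  rw [pvFibGo]
  rw [if_neg (by omega)]
  have hM : (0:ℤ) < pvMOD := by norm_num [pvMOD]
  split_ifs <;>
    exact ⟨PySem.Int.mod_nonneg _ hM, PySem.Int.mod_lt _ hM⟩

theorem int_eq_of_cast (a b : ℤ) (ha : 0 ≤ a ∧ a < pvMOD) (hb : 0 ≤ b ∧ b < pvMOD)
    (h : (a : ZMod 1000000007) = (b : ZMod 1000000007)) : a = b := by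
  have h2 := (ZMod.intCast_eq_intCast_iff a b 1000000007).mp h
  have h3 : a % ((1000000007:ℕ):ℤ) = b % ((1000000007:ℕ):ℤ) := h2
  have hM : ((1000000007:ℕ):ℤ) = pvMOD := by norm_num [pvMOD]
  rw [hM, Int.emod_eq_of_lt ha.1 ha.2, Int.emod_eq_of_lt hb.1 hb.2] at h3
  exact h3

theorem pvMain (m : ℕ) (hm : m ≤ 500) : solve (m : ℤ) = solve_alt (m : ℤ) := by
  have hA := solve_eq_modsum m hm
  have hM : (0:ℤ) < pvMOD := by norm_num [pvMOD]
  have hAc : ((solve (m:ℤ) : ℤ) : ZMod 1000000007) = (Nat.fib (m+2) : ZMod 1000000007) := by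
    rw [hA, cast_pymod, cast_sum_range]
    exact (pvTV_fib m hm).2
  have hBc : ((solve_alt (m:ℤ) : ℤ) : ZMod 1000000007) = (Nat.fib (m+2) : ZMod 1000000007) := by
    unfold solve_alt pvFibFD
    have h1 : ((m:ℤ) + 2) = ((m+2 : ℕ) : ℤ) := by push_cast; ring
    rw [h1]
    simp only [Int.toNat_natCast]
    exact (pvFibGo_cast (m+2+1) (m+2) (by omega)).1
  apply int_eq_of_cast
  · rw [hA]; exact ⟨PySem.Int.mod_nonneg _ hM, PySem.Int.mod_lt _ hM⟩
  · exact pvFibFD_bound ((m:ℤ)+2) (by omega)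
  · rw [hAc, hBc]

-- ===== VERDICT (by name: the statement is the Claim_ definition above) =====
theorem solve_spec : Claim_unchanged_solve := by
  intro n hdom hpre
  unfold Spec_solve
  intro hnd
  unfold Pre_solve at hpre
  unfold D_solve at hnd
  by_cases hn : 0 ≤ n
  · obtain ⟨m, hm⟩ : ∃ m : ℕ, n = (m : ℤ) := ⟨n.toNat, by omega⟩
    subst hm
    exact pvMain m (by omega)
  · have h2 : n = -2 := by omega
    subst h2
    set_option maxRecDepth 100000 in decide

theorem solve_changed : Claim_changed_solve := by
  unfold Claim_changed_solve
  set_option maxRecDepth 100000 in decide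

theorem solve_tight : Claim_exact_solve := by
  intro n _ _ hd
  unfold D_solve at hd
  subst hd
  set_option maxRecDepth 100000 in decide
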